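-- pv_equiv track=rewrite | github.com/Generative-Engine-Marketing/GEM-Bench | benchmarking/evaluator/laaj_evaluator/agents/laaj_agent.py | _format_judge_result_to_emoji
-- ===== SOURCE A (Python) =====
-- from typing import List, Tuple
--
-- def _format_judge_result_to_emoji(extracted_num: List[int]) -> Tuple[List[str], List[str], List[str]]:
--     """Format the judge result to emoji
--
--     Args:
--         extracted_num: List[int]
--     Returns:
--         Tuple[List[str], List[str], List[str]]: The judge result to emoji
--
--     For example, if the judge result is [1, -1, 0], the output should be:
--     (
--         ["✅","❌","❌"],
--         ["❌","✅","❌"],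
--         ["❌","❌","✅"]
--     )
--     """
--     return (
--         [
--             "✅" if num == 1 else "❌" for num in extracted_num
--         ],
--         [
--             "✅" if num == -1 else "❌" for num in extracted_num
--         ],
--         [
--             "✅" if num == 0 else "❌" for num in extracted_num
--         ]
--     )
-- ===== SOURCE B (Python) =====
-- from typing import List, Tuple
--
-- _EMOJI_TABLE = {
--     1: ("\u2705", "\u274c", "\u274c"),
--     -1: ("\u274c", "\u2705", "\u274c"),
--     0: ("\u274c", "\u274c", "\u2705"),
-- }
-- _DEFAULT = ("\u274c", "\u274c", "\u274c")
--
-- def _format_judge_result_to_emoji(extracted_num: List[int]) -> Tuple[List[str], List[str], List[str]]: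
--     pos, neg, tie = [], [], []
--     for num in extracted_num:
--         a, b, c = _EMOJI_TABLE.get(num, _DEFAULT)
--         pos.append(a)
--         neg.append(b)
--         tie.append(c)
--     return (pos, neg, tie)
-- ===== Notes on version B (the rewrite author's own statement) =====
-- stated objective: simpler
-- what changed: Replaces three independent list comprehensions over the input with a single pass driven by a value->(emoji,emoji,emoji) lookup table with a default, appending to three accumulators built together.
import Mathlib
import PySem

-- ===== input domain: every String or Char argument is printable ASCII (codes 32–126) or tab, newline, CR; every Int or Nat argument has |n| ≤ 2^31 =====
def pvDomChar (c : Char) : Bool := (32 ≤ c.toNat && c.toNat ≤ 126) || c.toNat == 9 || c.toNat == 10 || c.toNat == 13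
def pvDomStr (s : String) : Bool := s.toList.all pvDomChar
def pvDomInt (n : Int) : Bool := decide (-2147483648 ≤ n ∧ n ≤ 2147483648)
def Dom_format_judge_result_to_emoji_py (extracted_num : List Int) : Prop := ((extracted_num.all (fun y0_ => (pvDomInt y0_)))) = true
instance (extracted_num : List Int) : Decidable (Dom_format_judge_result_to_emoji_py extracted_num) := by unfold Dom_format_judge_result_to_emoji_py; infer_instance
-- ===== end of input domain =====

-- ===== PORT A =====
-- B changes decomposition only: one table-driven pass instead of three comprehensions (objective: simpler).
def format_judge_result_to_emoji_py (extracted_num : List Int) : List String × List String × List String :=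
  (extracted_num.map (fun num => if num == 1 then "✅" else "❌"),
   extracted_num.map (fun num => if num == -1 then "✅" else "❌"),
   extracted_num.map (fun num => if num == 0 then "✅" else "❌"))

-- ===== PORT B =====
def emojiTable : PySem.Dict Int (String × String × String) :=
  (PySem.Dict.empty.insert 1 ("✅", "❌", "❌")).insert (-1) ("❌", "✅", "❌") |>.insert 0 ("❌", "❌", "✅")

def emojiDefault : String × String × String := ("❌", "❌", "❌")

def format_judge_result_to_emoji_py_alt (extracted_num : List Int) : List String × List String × List String :=
  let acc := extracted_num.foldl
    (fun (st : List String × List String × List String) num =>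
      let t := emojiTable.getD num emojiDefault
      (st.1 ++ [t.1], st.2.1 ++ [t.2.1], st.2.2 ++ [t.2.2]))
    ([], [], [])
  acc

-- ===== PRECONDITION & SPEC =====
def Spec_format_judge_result_to_emoji_py (extracted_num : List Int) (out : List String × List String × List String) : Prop := out = format_judge_result_to_emoji_py_alt extracted_num
instance (extracted_num : List Int) (out : List String × List String × List String) : Decidable (Spec_format_judge_result_to_emoji_py extracted_num out) := by unfold Spec_format_judge_result_to_emoji_py; infer_instance

-- ===== CLAIM (what is proved, stated in full; the proofs are below) =====
def Claim_equal_format_judge_result_to_emoji_py : Prop := ∀ (extracted_num : List Int), Dom_format_judge_result_to_emoji_py extracted_num → Spec_format_judge_result_to_emoji_py extracted_num (format_judge_result_to_emoji_py extracted_num)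

-- ===== LEMMAS AND PROOFS =====

-- ===== VERDICT (by name: the statement is the Claim_ definition above) =====
theorem lookup_components (x : Int) :
    emojiTable.getD x emojiDefault =
      ((if x = 1 then "✅" else "❌"), (if x = -1 then "✅" else "❌"), (if x = 0 then "✅" else "❌")) := by
  by_cases hx : x = 1
  · subst hx; rfl
  · by_cases hy : x = -1
    · subst hy; rfl
    · by_cases hz : x = 0
      · subst hz; rfl
      · simp [emojiTable, emojiDefault, PySem.Dict.getD, PySem.Dict.get?, PySem.Dict.empty,
          PySem.Dict.insert, List.find?, hx, hy, hz,
          show ((1:Int) == x) = false by simpa using Ne.symm hx,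
          show ((-1:Int) == x) = false by simpa using Ne.symm hy,
          show ((0:Int) == x) = false by simpa using Ne.symm hz]

theorem alt_eq_maps (extracted_num : List Int) :
    format_judge_result_to_emoji_py_alt extracted_num = format_judge_result_to_emoji_py extracted_num := by
  unfold format_judge_result_to_emoji_py_alt format_judge_result_to_emoji_py
  induction extracted_num using List.reverseRecOn with
  | nil => rfl
  | append_singleton xs x ih =>
    simp only [List.foldl_append, List.foldl_cons, List.foldl_nil, List.map_append, List.map,
      lookup_components, beq_iff_eq] at ih ⊢
    rw [ih]

theorem format_judge_result_to_emoji_py_spec : Claim_equal_format_judge_result_to_emoji_py := by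
  intro xs _
  unfold Spec_format_judge_result_to_emoji_py
  exact (alt_eq_maps xs).symm
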